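-- pv_equiv track=rewrite | github.com/Sasikeerthan/RAG_Doc | rag_chatbot.py | _build_word_to_sentence_map
-- ===== SOURCE A (Python) =====
-- def _build_word_to_sentence_map(words, sentences):
--     """Map each word index to its sentence index."""
--     mapping = []
--     sent_idx = 0
--     word_pos = 0
--     sent_words = [s.split() for s in sentences]
--
--     for wi in range(len(words)):
--         while sent_idx < len(sent_words) and word_pos >= len(sent_words[sent_idx]):
--             word_pos = 0
--             sent_idx += 1
--         mapping.append(min(sent_idx, len(sentences) - 1))
--         word_pos += 1
--     return mapping
-- ===== SOURCE B (Python) =====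
-- def _build_word_to_sentence_map(words, sentences):
--     """Map each word index to its sentence index."""
--     flat = [si for si, s in enumerate(sentences) for _ in s.split()]
--     pad = len(sentences) - 1
--     return [flat[i] if i < len(flat) else pad for i in range(len(words))]
-- ===== Notes on version B (the rewrite author's own statement) =====
-- stated objective: simpler
-- what changed: Replaces A's per-word two-pointer walk (sentence index + word position with an inner catch-up loop) by building the flat word-index->sentence-index table once via enumerate and then indexing/padding it with len(sentences)-1.
import Mathlib
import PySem

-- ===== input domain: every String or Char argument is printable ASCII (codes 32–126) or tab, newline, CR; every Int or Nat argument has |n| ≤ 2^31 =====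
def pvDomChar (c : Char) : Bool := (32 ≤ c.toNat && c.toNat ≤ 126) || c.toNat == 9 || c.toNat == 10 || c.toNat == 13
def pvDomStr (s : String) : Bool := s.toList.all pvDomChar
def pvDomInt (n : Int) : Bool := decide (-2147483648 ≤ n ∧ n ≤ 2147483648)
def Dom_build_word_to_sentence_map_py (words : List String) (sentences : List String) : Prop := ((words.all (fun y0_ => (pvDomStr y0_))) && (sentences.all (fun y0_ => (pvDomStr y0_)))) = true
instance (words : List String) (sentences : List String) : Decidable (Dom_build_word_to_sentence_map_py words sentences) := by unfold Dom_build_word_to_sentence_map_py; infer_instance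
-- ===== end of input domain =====

-- B replaces A's word-by-word two-pointer walk by building the flat word→sentence table once
-- and padding/indexing it (objective: simpler); same return value everywhere.

-- ===== PORT A =====
-- the inner `while sent_idx < len(sent_words) and word_pos >= len(sent_words[sent_idx]):` loop
def pvAdvance (sw : List (List String)) (si wp : Nat) : Nat × Nat :=
  if h : si < sw.length ∧ (sw.getD si []).length ≤ wp then
    pvAdvance sw (si + 1) 0
  else (si, wp)
termination_by sw.length - si
decreasing_by omega

def build_word_to_sentence_map_py (words : List String) (sentences : List String) : List Int :=
  let sentWords := sentences.map (fun s => PySem.Str.split₀ s)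
  ((PySem.List.pyRange 0 words.length 1).foldl
    (fun (st : List Int × Nat × Nat) (_wi : Int) =>
      (st.1 ++ [min (((pvAdvance sentWords st.2.1 st.2.2).1 : Int)) ((sentences.length : Int) - 1)],
       (pvAdvance sentWords st.2.1 st.2.2).1, (pvAdvance sentWords st.2.1 st.2.2).2 + 1))
    ([], 0, 0)).1

-- ===== PORT B =====
def build_word_to_sentence_map_py_alt (words : List String) (sentences : List String) : List Int :=
  let flat := (PySem.List.enumerate sentences 0).flatMap
      (fun p => (PySem.Str.split₀ p.2).map (fun _ => p.1))
  let pad : Int := (sentences.length : Int) - 1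
  (List.range words.length).map (fun i => if i < flat.length then flat.getD i 0 else pad)

-- ===== PRECONDITION & SPEC =====
def Spec_build_word_to_sentence_map_py (words : List String) (sentences : List String) (out : List Int) : Prop := out = build_word_to_sentence_map_py_alt words sentences
instance (words : List String) (sentences : List String) (out : List Int) : Decidable (Spec_build_word_to_sentence_map_py words sentences out) := by unfold Spec_build_word_to_sentence_map_py; infer_instance

-- ===== CLAIM (what is proved, stated in full; the proofs are below) =====
def Claim_equal_build_word_to_sentence_map_py : Prop := ∀ (words : List String) (sentences : List String), Dom_build_word_to_sentence_map_py words sentences → Spec_build_word_to_sentence_map_py words sentences (build_word_to_sentence_map_py words sentences)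

-- ===== LEMMAS AND PROOFS =====

-- proof-only helpers
def pvTotal (sw : List (List String)) : Nat := (sw.map List.length).sum
def pvPos (sw : List (List String)) (si wp : Nat) : Nat := ((sw.take si).map List.length).sum + wp
def pvFlat (o : Int) : List (List String) → List Int
  | [] => []
  | l :: rest => l.map (fun _ => o) ++ pvFlat (o + 1) rest
def pvVal (sw : List (List String)) (pad : Int) (p : Nat) : Int :=
  if p < pvTotal sw then (pvFlat 0 sw).getD p 0 else pad

lemma pvFlat_length : ∀ (sw : List (List String)) (o : Int), (pvFlat o sw).length = pvTotal sw := by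
  intro sw; induction sw with
  | nil => intro o; rfl
  | cons l rest ih =>
    intro o
    simp only [pvFlat, List.length_append, List.length_map, pvTotal, List.map_cons, List.sum_cons]
    rw [ih (o + 1)]; simp [pvTotal]

lemma pvFlat_getD : ∀ (sw : List (List String)) (o : Int) (si wp : Nat),
    si < sw.length → wp < (sw.getD si []).length →
    (pvFlat o sw).getD (((sw.take si).map List.length).sum + wp) 0 = o + si := by
  intro sw; induction sw with
  | nil => intro o si wp h; simp at h
  | cons l rest ih =>
    intro o si wp hsi hwp
    cases si with
    | zero =>
      have hwp' : wp < l.length := by simpa using hwp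
      simp only [List.take_zero, List.map_nil, List.sum_nil, Nat.zero_add, pvFlat, Nat.cast_zero]
      rw [List.getD_eq_getElem?_getD, List.getElem?_append_left (by simpa using hwp')]
      simp [hwp']
    | succ si =>
      have hsi' : si < rest.length := by simpa using hsi
      have hwp' : wp < (rest.getD si []).length := by simpa using hwp
      simp only [pvFlat, List.take_succ_cons, List.map_cons, List.sum_cons]
      rw [Nat.add_assoc, List.getD_eq_getElem?_getD,
          List.getElem?_append_right (by simp)]
      simp only [List.length_map, Nat.add_sub_cancel_left]
      have := ih (o + 1) si wp hsi' hwp'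
      rw [List.getD_eq_getElem?_getD] at this
      rw [this]
      omega

lemma pvSumTake_le : ∀ (sw : List (List String)) (k : Nat),
    ((sw.take k).map List.length).sum ≤ (sw.map List.length).sum := by
  intro sw; induction sw with
  | nil => intro k; simp
  | cons l rest ih =>
    intro k; cases k with
    | zero => simp
    | succ k =>
      simp only [List.take_succ_cons, List.map_cons, List.sum_cons]
      exact Nat.add_le_add_left (ih k) _

lemma pvTake_succ_sum : ∀ (sw : List (List String)) (si : Nat), si < sw.length →
    ((sw.take (si + 1)).map List.length).sum
      = ((sw.take si).map List.length).sum + (sw.getD si []).length := by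
  intro sw; induction sw with
  | nil => intro si h; simp at h
  | cons l rest ih =>
    intro si h
    cases si with
    | zero => simp
    | succ si =>
      simp only [List.take_succ_cons, List.map_cons, List.sum_cons, List.getD_cons_succ]
      rw [ih si (by simpa using h)]; omega

lemma pvAdvance_spec : ∀ (fuel : Nat) (sw : List (List String)) (si wp : Nat),
    sw.length - si ≤ fuel → si ≤ sw.length →
    (si < sw.length → wp ≤ (sw.getD si []).length) →
    (pvAdvance sw si wp).1 ≤ sw.length ∧
    pvPos sw (pvAdvance sw si wp).1 (pvAdvance sw si wp).2 = pvPos sw si wp ∧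
    ((pvAdvance sw si wp).1 < sw.length →
      (pvAdvance sw si wp).2 < (sw.getD (pvAdvance sw si wp).1 []).length) := by
  intro fuel
  induction fuel with
  | zero =>
    intro sw si wp hf hle hinv
    have hns : ¬ si < sw.length := by omega
    rw [pvAdvance, dif_neg (fun hc => hns hc.1)]
    exact ⟨hle, rfl, fun h => absurd h hns⟩
  | succ fuel ih =>
    intro sw si wp hf hle hinv
    by_cases h : si < sw.length ∧ (sw.getD si []).length ≤ wp
    · rw [pvAdvance, dif_pos h]
      have hwp : wp = (sw.getD si []).length := le_antisymm (hinv h.1) h.2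
      have h' := ih sw (si + 1) 0 (by omega) (by omega) (fun _ => by omega)
      refine ⟨h'.1, ?_, h'.2.2⟩
      rw [h'.2.1]
      simp only [pvPos]
      rw [pvTake_succ_sum sw si h.1]
      omega
    · rw [pvAdvance, dif_neg h]
      refine ⟨hle, rfl, fun hlt => ?_⟩
      have hlt' : si < sw.length := hlt
      show wp < (sw.getD si []).length
      by_contra hge
      exact h ⟨hlt', by omega⟩

lemma pvCore (sw : List (List String)) (pad : Int) (hpad : pad = (sw.length : Int) - 1) :
    ∀ (l : List Int) (si wp : Nat) (m : List Int),
    si ≤ sw.length → (si < sw.length → wp ≤ (sw.getD si []).length) →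
    (l.foldl
      (fun (st : List Int × Nat × Nat) (_wi : Int) =>
        (st.1 ++ [min (((pvAdvance sw st.2.1 st.2.2).1 : Int)) pad],
         (pvAdvance sw st.2.1 st.2.2).1, (pvAdvance sw st.2.1 st.2.2).2 + 1))
      (m, si, wp)).1
    = m ++ (List.range l.length).map (fun k => pvVal sw pad (pvPos sw si wp + k)) := by
  intro l
  induction l with
  | nil => intro si wp m _ _; simp
  | cons x l ih =>
    intro si wp m hle hinv
    obtain ⟨h1, h2, h3⟩ := pvAdvance_spec (sw.length - si) sw si wp (le_refl _) hle hinv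
    simp only [List.foldl_cons]
    rw [ih ((pvAdvance sw si wp).1) ((pvAdvance sw si wp).2 + 1) _ h1
        (fun hlt => by have := h3 hlt; omega)]
    have hposs : pvPos sw (pvAdvance sw si wp).1 ((pvAdvance sw si wp).2 + 1)
        = pvPos sw si wp + 1 := by
      simp only [pvPos] at h2 ⊢; omega
    have hval : min (((pvAdvance sw si wp).1 : Int)) pad = pvVal sw pad (pvPos sw si wp) := by
      by_cases hlt : (pvAdvance sw si wp).1 < sw.length
      · have hwp := h3 hlt
        have hplt : pvPos sw si wp < pvTotal sw := by
          have hsum := pvSumTake_le sw ((pvAdvance sw si wp).1 + 1)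
          rw [pvTake_succ_sum sw _ hlt] at hsum
          rw [← h2]
          simp only [pvPos, pvTotal]; omega
        rw [pvVal, if_pos hplt, ← h2]
        simp only [pvPos]
        rw [pvFlat_getD sw 0 _ _ hlt hwp]
        have hc : ((pvAdvance sw si wp).1 : Int) < (sw.length : Int) := by exact_mod_cast hlt
        rw [hpad]; omega
      · have heq : (pvAdvance sw si wp).1 = sw.length := by omega
        have hge : ¬ pvPos sw si wp < pvTotal sw := by
          rw [← h2, heq]
          simp only [pvPos, pvTotal, List.take_length]
          omega
        rw [pvVal, if_neg hge, heq, hpad]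
        omega
    rw [hposs, hval]
    simp only [List.length_cons, List.range_succ_eq_map, List.map_cons, List.map_map,
        List.append_assoc, List.singleton_append, Nat.add_zero]
    congr 1
    congr 1
    apply List.map_congr_left; intro k _
    simp only [Function.comp_apply]
    congr 1
    omega

lemma pvEnumFlat : ∀ (ss : List String) (s : Int),
    (PySem.List.enumerate ss s).flatMap (fun p => (PySem.Str.split₀ p.2).map (fun _ => p.1))
      = pvFlat s (ss.map PySem.Str.split₀) := by
  intro ss; induction ss with
  | nil => intro s; simp [PySem.List.enumerate_nil, pvFlat]
  | cons a ss ih =>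
    intro s
    simp only [PySem.List.enumerate_cons, List.flatMap_cons, List.map_cons, pvFlat]
    rw [ih (s + 1)]

-- ===== VERDICT (by name: the statement is the Claim_ definition above) =====
theorem build_word_to_sentence_map_py_spec : Claim_equal_build_word_to_sentence_map_py := by
  intro words sentences _
  unfold Spec_build_word_to_sentence_map_py build_word_to_sentence_map_py build_word_to_sentence_map_py_alt
  set sw := sentences.map (fun s => PySem.Str.split₀ s) with hsw
  have hlen : sentences.length = sw.length := by simp [hsw]
  have hcore := pvCore sw ((sentences.length : Int) - 1) (by rw [hlen])
      (PySem.List.pyRange 0 (words.length : Int) 1) 0 0 [] (by omega) (fun _ => by omega)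
  simp only [hcore]
  have hl : (PySem.List.pyRange 0 (words.length : Int) 1).length = words.length := by
    rw [PySem.List.length_pyRange_one]; omega
  rw [hl]
  have hflat : (PySem.List.enumerate sentences 0).flatMap
      (fun p => (PySem.Str.split₀ p.2).map (fun _ => p.1)) = pvFlat 0 sw := by
    rw [pvEnumFlat]
  simp only [hflat, pvFlat_length]
  apply List.map_congr_left
  intro k _
  simp [pvVal, pvPos]
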